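-- pv_equiv track=rewrite | github.com/Alepernicolo/advent-of-code | 2016/day01.py | get_coordinates_to_building
-- ===== SOURCE A (Python) =====
-- from typing import NamedTuple, List, Dict
--
-- north = 0
--
-- east = 1
--
-- south = 2
--
-- west = 3
--
-- def get_coordinates_to_building(data) -> List:
--     player_pos = [0,0] #coordination that we'll use
--     state = north
--     positions = []
--
--     for i in range(len(data)):
--         pos = data[i]
--         val = int(pos[1:])
--         # nach R oder L
--         if state == north:
--             # nach osten oder westen
--             if pos[0] == 'R':
--                 player_pos[0] += val
--                 state = east
--             else:
--                 player_pos[0] -= val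
--                 state = west
--
--         elif state == east:
--             # nach s端den oder norden
--             if pos[0] == 'R':
--                 player_pos[1] -= val
--                 state = south
--             else:
--                 player_pos[1] += val
--                 state = north
--
--         elif state == south:
--             # nach westen oder osten
--             if pos[0] == 'R':
--                 player_pos[0] -= val
--                 state = west
--             else:
--                 player_pos[0] += val
--                 state = east
--         elif state == west:
--             # nach norden oder s端den
--             if pos[0] == 'R':
--                 player_pos[1] += val
--                 state = north
--             else:
--                 player_pos[1] -= val
--                 state = south
--         positions.append(list(player_pos))
--
--     return positions
-- ===== SOURCE B (Python) =====
-- def get_coordinates_to_building(data):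
--     x, y = 0, 0
--     dx, dy = 0, 1  # heading vector, north
--     positions = []
--     for pos in data:
--         val = int(pos[1:])
--         if pos[0] == 'R':
--             dx, dy = dy, -dx
--         else:
--             dx, dy = -dy, dx
--         x += dx * val
--         y += dy * val
--         positions.append([x, y])
--     return positions
-- ===== Notes on version B (the rewrite author's own statement) =====
-- stated objective: simpler
-- what changed: Replaces the four-state compass dispatch (nested if/elif per state) with a maintained heading vector (dx,dy) rotated arithmetically on R/L, then a single x+=dx*val, y+=dy*val update.
import Mathlib
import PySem

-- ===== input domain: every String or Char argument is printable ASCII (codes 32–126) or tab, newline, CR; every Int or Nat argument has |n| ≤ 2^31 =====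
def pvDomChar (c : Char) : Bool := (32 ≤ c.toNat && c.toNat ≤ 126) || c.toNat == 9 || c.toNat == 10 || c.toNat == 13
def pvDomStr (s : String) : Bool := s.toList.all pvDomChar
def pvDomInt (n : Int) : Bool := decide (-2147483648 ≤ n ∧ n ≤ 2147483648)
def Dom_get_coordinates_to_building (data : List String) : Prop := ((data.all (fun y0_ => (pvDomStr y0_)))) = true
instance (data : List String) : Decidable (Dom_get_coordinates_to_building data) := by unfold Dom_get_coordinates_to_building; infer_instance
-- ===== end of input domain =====

-- B replaces A's four-state compass dispatch with a heading vector (dx,dy) rotated on R/L; equivalence of return values proved on Pre_ (A also mutates no observable caller state).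

-- ===== PORT A =====
-- the loop over range(len(data)) as structural recursion carrying (player_pos, state);
-- north=0, east=1, south=2, west=3 as in the module constants
def goA : List String → Int → Int → Int → List (List Int)
  | [], _, _, _ => []
  | pos :: rest, px, py, state =>
    let val := (PySem.Int.ofStr? (PySem.Str.slice pos (some 1) none)).getD 0
    let c := (PySem.Str.pyGet? pos 0).getD ' '
    let st :=
      if state = 0 then
        if c = 'R' then (px + val, py, (1 : Int)) else (px - val, py, (3 : Int))
      else if state = 1 then
        if c = 'R' then (px, py - val, (2 : Int)) else (px, py + val, (0 : Int))
      else if state = 2 then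
        if c = 'R' then (px - val, py, (3 : Int)) else (px + val, py, (1 : Int))
      else if state = 3 then
        if c = 'R' then (px, py + val, (0 : Int)) else (px, py - val, (2 : Int))
      else (px, py, state)
    [st.1, st.2.1] :: goA rest st.1 st.2.1 st.2.2

def get_coordinates_to_building (data : List String) : List (List Int) :=
  goA data 0 0 0

-- ===== PORT B =====
def goB : List String → Int → Int → Int → Int → List (List Int)
  | [], _, _, _, _ => []
  | pos :: rest, x, y, dx, dy =>
    let val := (PySem.Int.ofStr? (PySem.Str.slice pos (some 1) none)).getD 0
    let c := (PySem.Str.pyGet? pos 0).getD ' '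
    let d := if c = 'R' then (dy, -dx) else (-dy, dx)
    let x' := x + d.1 * val
    let y' := y + d.2 * val
    [x', y'] :: goB rest x' y' d.1 d.2

def get_coordinates_to_building_alt (data : List String) : List (List Int) :=
  goB data 0 0 0 1

-- ===== PRECONDITION & SPEC =====
-- Pre_ excludes exactly the inputs where Python A raises: some instruction whose tail
-- pos[1:] is not a valid int literal (ValueError from int, or IndexError on "" since
-- int("") also fails first only for ""; a valid tail forces len(pos) >= 2 so pos[0] exists).
def Pre_get_coordinates_to_building (data : List String) : Prop :=
  ∀ s ∈ data, (PySem.Int.ofStr? (PySem.Str.slice s (some 1) none)).isSome = true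
instance (data : List String) : Decidable (Pre_get_coordinates_to_building data) := by
  unfold Pre_get_coordinates_to_building; infer_instance
def pvWitness_get_coordinates_to_building : List String := ["R2", "L3", "R1", "L5"]
def Spec_get_coordinates_to_building (data : List String) (out : List (List Int)) : Prop := out = get_coordinates_to_building_alt data
instance (data : List String) (out : List (List Int)) : Decidable (Spec_get_coordinates_to_building data out) := by unfold Spec_get_coordinates_to_building; infer_instance

-- ===== CLAIM (what is proved, stated in full; the proofs are below) =====
def Claim_equal_get_coordinates_to_building : Prop := ∀ (data : List String), Dom_get_coordinates_to_building data → Pre_get_coordinates_to_building data → Spec_get_coordinates_to_building data (get_coordinates_to_building data)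

-- ===== LEMMAS AND PROOFS =====
-- loop invariant: A's compass state corresponds to B's heading vector
-- (0↔(0,1), 1↔(1,0), 2↔(0,-1), 3↔(-1,0)) and the coordinates coincide
lemma goA_eq_goB (data : List String) : ∀ (px py : Int),
    goA data px py 0 = goB data px py 0 1 ∧
    goA data px py 1 = goB data px py 1 0 ∧
    goA data px py 2 = goB data px py 0 (-1) ∧
    goA data px py 3 = goB data px py (-1) 0 := by
  induction data with
  | nil => intro px py; simp [goA, goB]
  | cons pos rest ih =>
    intro px py
    simp only [goA, goB]
    generalize (PySem.Int.ofStr? (PySem.Str.slice pos (some 1) none)).getD 0 = v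
    generalize (PySem.Str.pyGet? pos 0).getD ' ' = c
    by_cases hc : c = 'R'
    · refine ⟨?_, ?_, ?_, ?_⟩
      · norm_num [hc, ← sub_eq_add_neg]; exact (ih _ _).2.1
      · norm_num [hc, ← sub_eq_add_neg]; exact (ih _ _).2.2.1
      · norm_num [hc, ← sub_eq_add_neg]; exact (ih _ _).2.2.2
      · norm_num [hc, ← sub_eq_add_neg]; exact (ih _ _).1
    · refine ⟨?_, ?_, ?_, ?_⟩
      · norm_num [hc, ← sub_eq_add_neg]; exact (ih _ _).2.2.2
      · norm_num [hc, ← sub_eq_add_neg]; exact (ih _ _).1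
      · norm_num [hc, ← sub_eq_add_neg]; exact (ih _ _).2.1
      · norm_num [hc, ← sub_eq_add_neg]; exact (ih _ _).2.2.1

-- ===== VERDICT (by name: the statement is the Claim_ definition above) =====
theorem get_coordinates_to_building_spec : Claim_equal_get_coordinates_to_building := by
  intro data _ _
  unfold Spec_get_coordinates_to_building get_coordinates_to_building get_coordinates_to_building_alt
  exact (goA_eq_goB data 0 0).1
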